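-- pv_equiv track=rewrite | github.com/SamuelPPlab/Projeto-Restaurant-Orders | src/analyze_log.py | never_ordered
-- ===== SOURCE A (Python) =====
-- def never_ordered(customer, all_orders):
--     dishs_types = {
--         order['k2_ordered_dish']
--         for order in all_orders
--     }
--     ordered_dish_customer = {
--         order['k2_ordered_dish']
--         for order in all_orders
--         if order['k1_customer'] == customer
--     }
--
--     dish_never_ordered = dishs_types ^ ordered_dish_customer
--     return dish_never_ordered
-- ===== SOURCE B (Python) =====
-- def never_ordered(customer, all_orders):
--     # One pass: inverted index dish -> set of customers who ordered it,
--     # then keep the dishes whose customer-set misses this customer.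
--     dish_to_customers = {}
--     for order in all_orders:
--         dish = order['k2_ordered_dish']
--         custs = dish_to_customers.get(dish, set())
--         custs.add(order['k1_customer'])
--         dish_to_customers[dish] = custs
--     return {dish for dish in dish_to_customers
--             if customer not in dish_to_customers[dish]}
-- ===== Notes on version B (the rewrite author's own statement) =====
-- stated objective: alternative
-- what changed: B builds a dish-to-customers inverted index in one pass over the orders and keeps dishes whose customer set misses the customer, instead of A's two set comprehensions combined by symmetric difference (equal because the customer's dishes are a subset of all dishes).
import Mathlib
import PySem

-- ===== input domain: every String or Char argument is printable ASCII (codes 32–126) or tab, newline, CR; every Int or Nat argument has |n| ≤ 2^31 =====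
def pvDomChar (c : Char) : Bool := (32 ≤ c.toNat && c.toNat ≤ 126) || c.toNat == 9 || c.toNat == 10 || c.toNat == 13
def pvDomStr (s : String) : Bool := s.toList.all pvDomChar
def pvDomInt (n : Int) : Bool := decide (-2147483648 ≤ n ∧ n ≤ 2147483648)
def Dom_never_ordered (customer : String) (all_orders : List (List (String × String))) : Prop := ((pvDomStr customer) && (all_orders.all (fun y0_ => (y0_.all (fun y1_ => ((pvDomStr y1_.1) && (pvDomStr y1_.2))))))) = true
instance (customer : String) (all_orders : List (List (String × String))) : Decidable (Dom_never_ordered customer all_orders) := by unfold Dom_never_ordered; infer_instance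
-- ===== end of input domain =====

-- B replaces A's two set comprehensions + symmetric difference by a one-pass
-- dish→customers inverted index queried per dish (alternative decomposition, same cost).

-- ===== PORT A =====
-- shared dict lookups: order['k2_ordered_dish'] / order['k1_customer'];
-- getD with "" is exact under Pre_ (the key is present; Python raises KeyError otherwise, excluded by Pre_)
def pvDish (o : List (String × String)) : String := (PySem.Dict.mk o).getD "k2_ordered_dish" ""
def pvCust (o : List (String × String)) : String := (PySem.Dict.mk o).getD "k1_customer" ""

def never_ordered (customer : String) (all_orders : List (List (String × String))) : List String :=
  let dishs_types : PySem.Set String := PySem.Set.ofList (all_orders.map pvDish)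
  let ordered_dish_customer : PySem.Set String :=
    PySem.Set.ofList ((all_orders.filter (fun o => pvCust o == customer)).map pvDish)
  PySem.Set.symmDiff dishs_types ordered_dish_customer

-- ===== PORT B =====
def never_ordered_alt (customer : String) (all_orders : List (List (String × String))) : List String :=
  let idx : PySem.Dict String (PySem.Set String) :=
    all_orders.foldl
      (fun d o => d.insert (pvDish o) (PySem.Set.add (d.getD (pvDish o) PySem.Set.empty) (pvCust o)))
      PySem.Dict.empty
  PySem.Set.ofList
    (idx.keys.filter (fun dish => !(PySem.Set.contains (idx.getD dish PySem.Set.empty) customer)))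

-- ===== PRECONDITION & SPEC =====
-- Pre_ excludes exactly the inputs where Python A raises KeyError: an order dict missing one of the two keys.
def Pre_never_ordered (customer : String) (all_orders : List (List (String × String))) : Prop :=
  all_orders.all (fun o => (PySem.Dict.mk o).contains "k1_customer" && (PySem.Dict.mk o).contains "k2_ordered_dish") = true
instance (customer : String) (all_orders : List (List (String × String))) : Decidable (Pre_never_ordered customer all_orders) := by unfold Pre_never_ordered; infer_instance
def pvWitness_never_ordered : String × (List (List (String × String))) :=
  ("alice", [[("k1_customer", "bob"), ("k2_ordered_dish", "soup")]])

def Spec_never_ordered (customer : String) (all_orders : List (List (String × String))) (out : List String) : Prop := out = never_ordered_alt customer all_orders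
instance (customer : String) (all_orders : List (List (String × String))) (out : List String) : Decidable (Spec_never_ordered customer all_orders out) := by unfold Spec_never_ordered; infer_instance

-- ===== CLAIM (what is proved, stated in full; the proofs are below) =====
def Claim_equal_never_ordered : Prop := ∀ (customer : String) (all_orders : List (List (String × String))), Dom_never_ordered customer all_orders → Pre_never_ordered customer all_orders → Spec_never_ordered customer all_orders (never_ordered customer all_orders)

-- ===== LEMMAS AND PROOFS =====

theorem foldl_add_of_nodup {α : Type} [BEq α] [LawfulBEq α] :
    ∀ (l s : List α), (s ++ l).Nodup → l.foldl PySem.Set.add s = s ++ l := by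
  intro l
  induction l with
  | nil => intro s _; simp
  | cons x t ih =>
    intro s h
    have hx : x ∉ s := by
      intro hmem
      exact (List.disjoint_of_nodup_append h) hmem (List.mem_cons_self)
    have := ih (s ++ [x]) (by simpa using h)
    simpa [List.foldl_cons, PySem.Set.add_of_not_mem hx] using this

theorem ofList_of_nodup {α : Type} [BEq α] [LawfulBEq α] (l : List α) (h : l.Nodup) :
    PySem.Set.ofList l = l := by
  have := foldl_add_of_nodup l [] (by simpa using h)
  simpa [PySem.Set.ofList_eq_foldl] using this

theorem mem_getD_fold (customer dish : String) :
    ∀ (l : List (List (String × String))) (d : PySem.Dict String (PySem.Set String)),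
      (customer ∈ (l.foldl
        (fun d o => d.insert (pvDish o) (PySem.Set.add (d.getD (pvDish o) PySem.Set.empty) (pvCust o)))
        d).getD dish PySem.Set.empty
      ↔ customer ∈ d.getD dish PySem.Set.empty ∨ ∃ o ∈ l, pvDish o = dish ∧ pvCust o = customer) := by
  intro l
  induction l with
  | nil => intro d; simp
  | cons o t ih =>
    intro d
    rw [List.foldl_cons, ih]
    rw [PySem.Dict.getD_insert]
    by_cases hd : dish = pvDish o
    · subst hd
      simp only [if_true, PySem.Set.mem_add, true_and, List.mem_cons, exists_eq_or_imp]
      tauto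
    · simp only [if_neg hd, List.mem_cons, exists_eq_or_imp]
      have : ¬ (pvDish o = dish) := fun h => hd h.symm
      tauto

-- ===== VERDICT (by name: the statement is the Claim_ definition above) =====
theorem never_ordered_spec : Claim_equal_never_ordered := by
  intro customer all_orders _ _
  unfold Spec_never_ordered never_ordered never_ordered_alt
  simp only []
  set S : PySem.Set String := PySem.Set.ofList (all_orders.map pvDish) with hS
  set T : PySem.Set String :=
    PySem.Set.ofList ((all_orders.filter (fun o => pvCust o == customer)).map pvDish) with hT
  set idx : PySem.Dict String (PySem.Set String) :=
    all_orders.foldl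
      (fun d o => d.insert (pvDish o) (PySem.Set.add (d.getD (pvDish o) PySem.Set.empty) (pvCust o)))
      PySem.Dict.empty with hidx
  have hkeys : idx.keys = S := by
    rw [hidx, PySem.Dict.keys_foldl_insert_key (key := pvDish)]
    simp only [PySem.Dict.keys_empty, PySem.Set.update_nil_left]
    exact hS.symm
  -- membership characterisation of the inverted index
  have hmemidx : ∀ dish : String,
      customer ∈ idx.getD dish PySem.Set.empty ↔
        ∃ o ∈ all_orders, pvDish o = dish ∧ pvCust o = customer := by
    intro dish
    rw [hidx, mem_getD_fold]
    simp [PySem.Set.empty]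
  -- membership characterisation of A's customer-dish set
  have hmemT : ∀ dish : String,
      dish ∈ T ↔ ∃ o ∈ all_orders, pvDish o = dish ∧ pvCust o = customer := by
    intro dish
    rw [hT, PySem.Set.mem_ofList]
    simp only [List.mem_map, List.mem_filter, beq_iff_eq]
    constructor
    · rintro ⟨o, ⟨ho, hc⟩, hdish⟩; exact ⟨o, ho, hdish, hc⟩
    · rintro ⟨o, ho, hdish, hc⟩; exact ⟨o, ⟨ho, hc⟩, hdish⟩
  -- T ⊆ S, hence the second half of the symmetric difference is empty
  have hTS : PySem.Set.diff T S = [] := by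
    show T.filter (fun x => !(PySem.Set.contains S x)) = []
    rw [List.filter_eq_nil_iff]
    intro x hx
    obtain ⟨o, ho, hdish, _⟩ := (hmemT x).mp hx
    have hxS : x ∈ S := by
      rw [hS, PySem.Set.mem_ofList, List.mem_map]
      exact ⟨o, ho, hdish⟩
    simp [PySem.Set.contains_eq_listContains, hxS]
  have hnodup : (idx.keys.filter
      (fun dish => !(PySem.Set.contains (idx.getD dish PySem.Set.empty) customer))).Nodup := by
    exact List.Nodup.filter _ (hkeys ▸ PySem.Set.nodup_ofList _)
  rw [ofList_of_nodup _ hnodup, hkeys]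
  show PySem.Set.diff S T ++ PySem.Set.diff T S = _
  rw [hTS, List.append_nil]
  show S.filter (fun x => !(PySem.Set.contains T x)) = _
  apply List.filter_congr
  intro dish _
  congr 1
  rw [Bool.eq_iff_iff]
  simp only [PySem.Set.contains_eq_listContains, List.contains_iff_mem]
  rw [hmemT, hmemidx]
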